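-- pv_equiv track=rewrite | github.com/cyeinfpro/PhotoPanel | app.py | normalize_album_rel_path
-- ===== SOURCE A (Python) =====
-- def normalize_album_rel_path(raw_path):
--     rel = str(raw_path or "").strip().replace("\\", "/")
--     if not rel:
--         return ""
--
--     parts = []
--     for part in rel.split("/"):
--         p = part.strip()
--         if not p or p == ".":
--             continue
--         if p == "..":
--             return ""
--         parts.append(p)
--
--     return "/".join(parts)
-- ===== SOURCE B (Python) =====
-- def normalize_album_rel_path(raw_path):
--     s = str(raw_path or "").strip()
--     segs = []
--     buf = []
--     for ch in s + "/":
--         if ch in "/\\":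
--             p = "".join(buf).strip()
--             buf = []
--             if p == "..":
--                 return ""
--             if p and p != ".":
--                 segs.append(p)
--         else:
--             buf.append(ch)
--     return "/".join(segs)
-- ===== Notes on version B (the rewrite author's own statement) =====
-- stated objective: alternative
-- what changed: Replaces A's replace-then-split-then-filter pipeline with a single character-level scanner that accumulates each segment in a buffer and flushes it at either separator character (slash or backslash), filtering segments on the fly instead of splitting a materialized string.
import Mathlib
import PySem

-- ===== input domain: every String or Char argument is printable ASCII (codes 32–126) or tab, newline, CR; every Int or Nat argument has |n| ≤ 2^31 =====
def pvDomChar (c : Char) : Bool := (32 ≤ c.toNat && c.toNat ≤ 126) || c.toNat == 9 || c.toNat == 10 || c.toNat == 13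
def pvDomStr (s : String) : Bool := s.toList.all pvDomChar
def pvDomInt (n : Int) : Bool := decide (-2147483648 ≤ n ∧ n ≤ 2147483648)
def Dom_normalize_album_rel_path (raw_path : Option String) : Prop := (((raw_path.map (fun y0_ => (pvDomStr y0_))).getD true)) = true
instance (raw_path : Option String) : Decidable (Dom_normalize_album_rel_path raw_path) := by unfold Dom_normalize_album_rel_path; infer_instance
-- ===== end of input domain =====

-- B replaces A's replace-then-split-then-filter pipeline with a single character-level scanner (buffer flushed at either separator character); same return values, alternative structure.


-- ===== PORT A =====
-- A's loop over the split segments: strip, skip empty/'.', early-return on '..', accumulate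
def pvALoop (segs : List String) (parts : List String) : String :=
  match segs with
  | [] => PySem.Str.join "/" parts
  | part :: rest =>
    let p := PySem.Str.strip part
    if p = "" ∨ p = "." then pvALoop rest parts
    else if p = ".." then ""
    else pvALoop rest (parts ++ [p])

def normalize_album_rel_path (raw_path : Option String) : String :=
  let rel := PySem.Str.replace (PySem.Str.strip (raw_path.getD "")) "\\" "/"
  if rel = "" then ""
  else pvALoop ((PySem.Str.split? rel "/").getD []) []

-- ===== PORT B =====
-- B's character scanner: buf accumulates the current segment; '/' or '\' flushes it
-- ('..' returns "", empty/'.' segments are dropped); a trailing '/' sentinel flushes the last one.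
def pvBScan (cs : List Char) (buf : List Char) (segs : List String) : String :=
  match cs with
  | [] => PySem.Str.join "/" segs
  | c :: rest =>
    if c = '/' ∨ c = '\\' then
      let p := PySem.Str.strip (String.ofList buf)
      if p = ".." then ""
      else if p ≠ "" ∧ p ≠ "." then pvBScan rest [] (segs ++ [p])
      else pvBScan rest [] segs
    else pvBScan rest (buf ++ [c]) segs

def normalize_album_rel_path_alt (raw_path : Option String) : String :=
  pvBScan ((PySem.Str.strip (raw_path.getD "")).toList ++ ['/']) [] []

-- ===== PRECONDITION & SPEC =====
def Spec_normalize_album_rel_path (raw_path : Option String) (out : String) : Prop := out = normalize_album_rel_path_alt raw_path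
instance (raw_path : Option String) (out : String) : Decidable (Spec_normalize_album_rel_path raw_path out) := by unfold Spec_normalize_album_rel_path; infer_instance

-- ===== CLAIM (what is proved, stated in full; the proofs are below) =====
def Claim_equal_normalize_album_rel_path : Prop := ∀ (raw_path : Option String), Dom_normalize_album_rel_path raw_path → Spec_normalize_album_rel_path raw_path (normalize_album_rel_path raw_path)

-- ===== LEMMAS AND PROOFS =====

-- proof-only helpers
def pvRepl (c : Char) : Char := if c = '\\' then '/' else c

-- split on '/' alone (A's split after replace)
def pvSplit1 (cs : List Char) : List (List Char) :=
  match cs with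
  | [] => [[]]
  | c :: rest => if c = '/' then [] :: pvSplit1 rest else (pvSplit1 rest).modifyHead (c :: ·)

-- split on '/' or '\\' (B's separators)
def pvSplit2 (cs : List Char) : List (List Char) :=
  match cs with
  | [] => [[]]
  | c :: rest => if c = '/' ∨ c = '\\' then [] :: pvSplit2 rest else (pvSplit2 rest).modifyHead (c :: ·)

-- the common reference loop over char-list segments, with A's branch order
def pvSegLoop (l : List (List Char)) (parts : List String) : String :=
  match l with
  | [] => PySem.Str.join "/" parts
  | g :: rest =>
    let p := PySem.Str.strip (String.ofList g)
    if p = "" ∨ p = "." then pvSegLoop rest parts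
    else if p = ".." then ""
    else pvSegLoop rest (parts ++ [p])

lemma pvReplace_go_map (l acc : List Char) (fuel : Nat) (h : l.length ≤ fuel) :
    PySem.Chars.replace.go ['\\'] ['/'] fuel l acc = acc.reverse ++ l.map pvRepl := by
  induction l generalizing acc fuel with
  | nil => cases fuel <;> simp [PySem.Chars.replace.go]
  | cons c t ih =>
    cases fuel with
    | zero => simp at h
    | succ f =>
      simp only [PySem.Chars.replace.go]
      by_cases hc : c = '\\'
      · subst hc
        have : List.isPrefixOf ['\\'] ('\\' :: t) = true := by simp [List.isPrefixOf]
        simp only [this, if_pos]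
        rw [show List.drop (['\\'] : List Char).length ('\\' :: t) = t from rfl,
            show (['/'] : List Char).reverse ++ acc = '/' :: acc from rfl]
        rw [ih ('/' :: acc) f (by simpa using h)]
        simp [pvRepl]
      · have : List.isPrefixOf ['\\'] (c :: t) = false := by
          simp [List.isPrefixOf, Ne.symm hc]
        simp only [this]
        rw [if_neg (by simp)]
        rw [ih (c :: acc) f (by simpa using h)]
        simp [pvRepl, hc]

lemma pvReplace_map (cs : List Char) :
    PySem.Chars.replace cs ['\\'] ['/'] = cs.map pvRepl := by
  simp only [PySem.Chars.replace]
  rw [if_neg (by simp)]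
  simpa using pvReplace_go_map cs [] cs.length le_rfl

lemma pvSplit1_ne_nil (cs : List Char) : pvSplit1 cs ≠ [] := by
  induction cs with
  | nil => simp [pvSplit1]
  | cons c rest ih =>
    simp only [pvSplit1]
    split
    · simp
    · cases h : pvSplit1 rest with
      | nil => exact absurd h ih
      | cons a b => simp [List.modifyHead]

lemma pvSplit2_ne_nil (cs : List Char) : pvSplit2 cs ≠ [] := by
  induction cs with
  | nil => simp [pvSplit2]
  | cons c rest ih =>
    simp only [pvSplit2]
    split
    · simp
    · cases h : pvSplit2 rest with
      | nil => exact absurd h ih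
      | cons a b => simp [List.modifyHead]

lemma pvSplitOn_go (l cur : List Char) (acc : List (List Char)) (fuel : Nat) (h : l.length ≤ fuel) :
    PySem.Chars.splitOn.go ['/'] fuel l cur acc
      = acc.reverse ++ (pvSplit1 l).modifyHead (cur.reverse ++ ·) := by
  induction l generalizing cur acc fuel with
  | nil => cases fuel <;> simp [PySem.Chars.splitOn.go, pvSplit1]
  | cons c t ih =>
    cases fuel with
    | zero => simp at h
    | succ f =>
      simp only [PySem.Chars.splitOn.go]
      by_cases hc : c = '/'
      · subst hc
        have hp : List.isPrefixOf ['/'] ('/' :: t) = true := by simp [List.isPrefixOf]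
        simp only [hp, if_pos]
        rw [show List.drop (['/'] : List Char).length ('/' :: t) = t by simp]
        rw [ih [] (cur.reverse :: acc) f (by simpa using h)]
        obtain ⟨a, b, hab⟩ := List.exists_cons_of_ne_nil (pvSplit1_ne_nil t)
        simp [pvSplit1, hab, List.modifyHead]
      · have hp : List.isPrefixOf ['/'] (c :: t) = false := by simp [List.isPrefixOf, Ne.symm hc]
        simp only [hp]
        rw [if_neg (by simp)]
        rw [ih (c :: cur) acc f (by simpa using h)]
        simp only [pvSplit1, if_neg hc]
        obtain ⟨a, b, hab⟩ := List.exists_cons_of_ne_nil (pvSplit1_ne_nil t)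
        simp [hab, List.modifyHead]

lemma pvSplitOn_eq (cs : List Char) :
    PySem.Chars.splitOn cs ['/'] = pvSplit1 cs := by
  simp only [PySem.Chars.splitOn]
  rw [pvSplitOn_go cs [] [] (cs.length + 1) (by omega)]
  obtain ⟨a, b, hab⟩ := List.exists_cons_of_ne_nil (pvSplit1_ne_nil cs)
  simp [hab, List.modifyHead]

lemma pvSplit_map (cs : List Char) : pvSplit1 (cs.map pvRepl) = pvSplit2 cs := by
  induction cs with
  | nil => simp [pvSplit1, pvSplit2]
  | cons c t ih =>
    simp only [List.map_cons, pvSplit1, pvSplit2]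
    by_cases hc : c = '/' ∨ c = '\\'
    · have : pvRepl c = '/' := by rcases hc with h | h <;> simp [pvRepl, h]
      simp [this, hc, ih]
    · push_neg at hc
      have : pvRepl c = c := by simp [pvRepl, hc.2]
      simp [this, hc.1, hc, ih]

lemma pvALoop_eq_seg (l : List (List Char)) (parts : List String) :
    pvALoop (l.map String.ofList) parts = pvSegLoop l parts := by
  induction l generalizing parts with
  | nil => simp [pvALoop, pvSegLoop]
  | cons g rest ih =>
    simp only [List.map_cons, pvALoop, pvSegLoop]
    split_ifs <;> simp [ih]

lemma pvBScan_eq_seg (cs : List Char) (buf : List Char) (segs : List String) :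
    pvBScan (cs ++ ['/']) buf segs = pvSegLoop ((pvSplit2 cs).modifyHead (buf ++ ·)) segs := by
  induction cs generalizing buf segs with
  | nil =>
    by_cases h2 : PySem.Str.strip (String.ofList buf) = ".."
    · simp [pvBScan, pvSplit2, pvSegLoop, h2]
    · by_cases h1 : PySem.Str.strip (String.ofList buf) = "" ∨ PySem.Str.strip (String.ofList buf) = "."
      · rcases h1 with h | h <;> simp [pvBScan, pvSplit2, pvSegLoop, h]
      · push_neg at h1
        simp [pvBScan, pvSplit2, pvSegLoop, h1.1, h1.2, h2]
  | cons c t ih =>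
    obtain ⟨a, b, hab⟩ := List.exists_cons_of_ne_nil (pvSplit2_ne_nil t)
    by_cases hc : c = '/' ∨ c = '\\'
    · by_cases h2 : PySem.Str.strip (String.ofList buf) = ".."
      · simp [pvBScan, pvSplit2, pvSegLoop, hc, h2]
      · by_cases h1 : PySem.Str.strip (String.ofList buf) = "" ∨ PySem.Str.strip (String.ofList buf) = "."
        · rcases h1 with h | h <;>
            simp [pvBScan, pvSplit2, pvSegLoop, hc, h, ih [] segs, hab, List.modifyHead]
        · push_neg at h1
          simp [pvBScan, pvSplit2, pvSegLoop, hc, h1.1, h1.2, h2,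
            ih [] (segs ++ [PySem.Str.strip (String.ofList buf)]), hab, List.modifyHead]
    · simp [pvBScan, pvSplit2, pvSegLoop, hc, ih (buf ++ [c]) segs, hab, List.modifyHead]

-- ===== VERDICT (by name: the statement is the Claim_ definition above) =====
theorem normalize_album_rel_path_spec : Claim_equal_normalize_album_rel_path := by
  intro raw_path _
  unfold Spec_normalize_album_rel_path normalize_album_rel_path normalize_album_rel_path_alt
  set s := raw_path.getD "" with hs
  set t := PySem.Chars.strip s.toList with ht
  have hstrip : (PySem.Str.strip s).toList = t := by simp [PySem.Str.strip, ht]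
  have hrel : (PySem.Str.replace (PySem.Str.strip s) "\\" "/").toList = t.map pvRepl := by
    simp only [PySem.Str.replace]
    rw [show ("\\" : String).toList = ['\\'] from rfl, show ("/" : String).toList = ['/'] from rfl]
    simp [hstrip, pvReplace_map]
  by_cases hnil : t = []
  · have : PySem.Str.replace (PySem.Str.strip s) "\\" "/" = "" := by
      rw [← String.toList_eq_nil_iff, hrel, hnil]; simp
    rw [if_pos this, hstrip, hnil]
    decide
  · have hne : PySem.Str.replace (PySem.Str.strip s) "\\" "/" ≠ "" := by
      rw [← String.toList_eq_nil_iff.ne, hrel]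
      simpa using hnil
    rw [if_neg hne]
    rw [show PySem.Str.split? (PySem.Str.replace (PySem.Str.strip s) "\\" "/") "/"
        = some ((pvSplit2 t).map String.ofList) by
      simp only [PySem.Str.split?, PySem.Chars.split?]
      rw [if_neg (by simp)]
      rw [show ("/" : String).toList = ['/'] from rfl, hrel, pvSplitOn_eq, pvSplit_map]
      rfl]
    simp only [Option.getD_some]
    rw [pvALoop_eq_seg, hstrip, pvBScan_eq_seg]
    obtain ⟨a, b, hab⟩ := List.exists_cons_of_ne_nil (pvSplit2_ne_nil t)
    rw [hab]
    simp [List.modifyHead]
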